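-- pv_equiv track=rewrite | github.com/Jacobdrosol/NexusAI | control_plane/api/chat.py | _split_sources_by_tier
-- ===== SOURCE A (Python) =====
-- from typing import Any, AsyncGenerator, Dict, List, Literal, Optional
--
-- def _source_tier(label: str) -> int:
--     lowered = str(label or "").lower()
--     if lowered.startswith("workspace:file") or lowered.startswith("workspace:search"):
--         return 0
--     if lowered.startswith("repo:"):
--         return 1
--     if lowered.startswith("vault:"):
--         return 2
--     return 3
--
-- def _split_sources_by_tier(labels: List[str]) -> tuple[List[str], List[str], List[str], List[str]]:
--     workspace: List[str] = []
--     repo: List[str] = []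
--     vault: List[str] = []
--     other: List[str] = []
--     for label in labels:
--         tier = _source_tier(label)
--         if tier == 0:
--             workspace.append(label)
--         elif tier == 1:
--             repo.append(label)
--         elif tier == 2:
--             vault.append(label)
--         else:
--             other.append(label)
--     return workspace, repo, vault, other
-- ===== SOURCE B (Python) =====
-- from typing import List
--
-- def _source_tier(label: str) -> int:
--     lowered = str(label or "").lower()
--     if lowered.startswith("workspace:file") or lowered.startswith("workspace:search"):
--         return 0
--     if lowered.startswith("repo:"):
--         return 1
--     if lowered.startswith("vault:"):
--         return 2
--     return 3
--
-- def _split_sources_by_tier(labels: List[str]) -> tuple[List[str], List[str], List[str], List[str]]: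
--     return (
--         [l for l in labels if _source_tier(l) == 0],
--         [l for l in labels if _source_tier(l) == 1],
--         [l for l in labels if _source_tier(l) == 2],
--         [l for l in labels if _source_tier(l) == 3],
--     )
-- ===== Notes on version B (the rewrite author's own statement) =====
-- stated objective: simpler
-- what changed: Replaces the single dispatch loop with four mutable accumulators by four independent filtering passes over labels, one comprehension per tier.
import Mathlib
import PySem

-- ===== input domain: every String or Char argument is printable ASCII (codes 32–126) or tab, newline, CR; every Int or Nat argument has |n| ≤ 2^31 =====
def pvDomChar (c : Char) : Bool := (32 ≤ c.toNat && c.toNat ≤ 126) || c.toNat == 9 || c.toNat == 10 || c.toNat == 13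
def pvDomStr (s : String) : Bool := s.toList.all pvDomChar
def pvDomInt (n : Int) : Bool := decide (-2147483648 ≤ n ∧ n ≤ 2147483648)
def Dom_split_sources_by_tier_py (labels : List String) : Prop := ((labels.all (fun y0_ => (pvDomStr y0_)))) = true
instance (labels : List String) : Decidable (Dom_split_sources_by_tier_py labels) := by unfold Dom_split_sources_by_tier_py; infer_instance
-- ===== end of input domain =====

-- B replaces A's single dispatch loop (four accumulators) by four independent filter passes; objective: simpler.

-- ===== PORT A =====
-- _source_tier: 'label or ""' is 'label' for a string argument unless empty, and lower "" = "", so lowering label directly is exact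
def source_tier_py (label : String) : Int :=
  let lowered := PySem.Str.lower label
  if PySem.Str.startswith lowered "workspace:file" || PySem.Str.startswith lowered "workspace:search" then 0
  else if PySem.Str.startswith lowered "repo:" then 1
  else if PySem.Str.startswith lowered "vault:" then 2
  else 3

def split_sources_by_tier_py (labels : List String) : List String × List String × List String × List String :=
  let st := labels.foldl (fun (acc : List String × List String × List String × List String) label =>
    let tier := source_tier_py label
    if tier = 0 then (acc.1 ++ [label], acc.2.1, acc.2.2.1, acc.2.2.2)
    else if tier = 1 then (acc.1, acc.2.1 ++ [label], acc.2.2.1, acc.2.2.2)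
    else if tier = 2 then (acc.1, acc.2.1, acc.2.2.1 ++ [label], acc.2.2.2)
    else (acc.1, acc.2.1, acc.2.2.1, acc.2.2.2 ++ [label])) ([], [], [], [])
  st

-- ===== PORT B =====
def split_sources_by_tier_py_alt (labels : List String) : List String × List String × List String × List String :=
  (labels.filter (fun l => source_tier_py l == 0),
   labels.filter (fun l => source_tier_py l == 1),
   labels.filter (fun l => source_tier_py l == 2),
   labels.filter (fun l => source_tier_py l == 3))

-- ===== PRECONDITION & SPEC =====
def Spec_split_sources_by_tier_py (labels : List String) (out : List String × List String × List String × List String) : Prop := out = split_sources_by_tier_py_alt labels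
instance (labels : List String) (out : List String × List String × List String × List String) : Decidable (Spec_split_sources_by_tier_py labels out) := by unfold Spec_split_sources_by_tier_py; infer_instance

-- ===== CLAIM (what is proved, stated in full; the proofs are below) =====
def Claim_equal_split_sources_by_tier_py : Prop := ∀ (labels : List String), Dom_split_sources_by_tier_py labels → Spec_split_sources_by_tier_py labels (split_sources_by_tier_py labels)

-- ===== LEMMAS AND PROOFS =====

theorem tier_cases (l : String) : source_tier_py l = 0 ∨ source_tier_py l = 1 ∨ source_tier_py l = 2 ∨ source_tier_py l = 3 := by
  simp only [source_tier_py]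
  split_ifs <;> simp

theorem foldl_inv (labels : List String) (w r v o : List String) :
    labels.foldl (fun (acc : List String × List String × List String × List String) label =>
      let tier := source_tier_py label
      if tier = 0 then (acc.1 ++ [label], acc.2.1, acc.2.2.1, acc.2.2.2)
      else if tier = 1 then (acc.1, acc.2.1 ++ [label], acc.2.2.1, acc.2.2.2)
      else if tier = 2 then (acc.1, acc.2.1, acc.2.2.1 ++ [label], acc.2.2.2)
      else (acc.1, acc.2.1, acc.2.2.1, acc.2.2.2 ++ [label])) (w, r, v, o)
    = (w ++ labels.filter (fun l => source_tier_py l == 0),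
       r ++ labels.filter (fun l => source_tier_py l == 1),
       v ++ labels.filter (fun l => source_tier_py l == 2),
       o ++ labels.filter (fun l => source_tier_py l == 3)) := by
  induction labels generalizing w r v o with
  | nil => simp
  | cons x xs ih =>
    simp only [List.foldl_cons, List.filter_cons]
    rcases tier_cases x with h | h | h | h <;>
      simp [h, ih]

-- ===== VERDICT (by name: the statement is the Claim_ definition above) =====
theorem split_sources_by_tier_py_spec : Claim_equal_split_sources_by_tier_py := by
  intro labels _
  unfold Spec_split_sources_by_tier_py split_sources_by_tier_py split_sources_by_tier_py_alt
  simpa using foldl_inv labels [] [] [] []
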